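-- pv_equiv track=rewrite | github.com/artbohr/Codewars-Algorithms-Python- | 7-kyu/check_concat.py | check_concatenated_sum
-- ===== SOURCE A (Python) =====
-- def check_concatenated_sum(n, t):
--     if t == 0: return False
--
--     minus = True if str(n)[0] == '-' else False
--     n_s = str(n)[1:] if minus else str(n)
--     arr_s = []
--
--     for x in n_s:
--         if minus:
--             arr_s.append('-' + (x * t))
--         else:
--             arr_s.append(x * t)
--
--     res = sum([int(x) for x in arr_s])
--
--     return n == res
-- ===== SOURCE B (Python) =====
-- def check_concatenated_sum(n, t):
--     if t <= 0:
--         return False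
--     repunit = (10 ** t - 1) // 9          # 1, 11, 111, ... (t ones)
--     s, d = 0, abs(n)
--     while d:
--         s += d % 10
--         d //= 10
--     total = s * repunit
--     return n == (-total if n < 0 else total)
-- ===== Notes on version B (the rewrite author's own statement) =====
-- stated objective: faster
-- what changed: B replaces A's build-a-string-per-digit-and-reparse approach (repeat each digit character t times, prepend '-', int() each, sum) by pure arithmetic: digit sum of |n| via a %10 // 10 loop, multiplied once by the repunit (10**t-1)//9, negated for negative n; no strings are built or parsed.
import Mathlib
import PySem

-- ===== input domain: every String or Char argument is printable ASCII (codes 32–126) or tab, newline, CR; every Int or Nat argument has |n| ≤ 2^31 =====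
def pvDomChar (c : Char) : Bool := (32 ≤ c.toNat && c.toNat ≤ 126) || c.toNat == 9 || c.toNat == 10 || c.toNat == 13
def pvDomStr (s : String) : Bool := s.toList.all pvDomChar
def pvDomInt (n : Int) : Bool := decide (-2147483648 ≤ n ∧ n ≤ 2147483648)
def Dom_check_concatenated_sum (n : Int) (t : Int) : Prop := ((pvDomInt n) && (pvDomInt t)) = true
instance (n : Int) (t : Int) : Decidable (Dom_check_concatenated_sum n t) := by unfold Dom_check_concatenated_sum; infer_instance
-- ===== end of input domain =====

-- B replaces A's build-a-string-per-digit-and-reparse scheme by pure arithmetic (digit sum of |n|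
-- times the repunit with t ones, negated for negative n); no per-digit strings are built or parsed.


-- ===== PORT A =====
-- hand port of Python's int(s) for exactly the strings A builds itself: an optional leading '-'
-- followed by decimal digit characters (no whitespace, '+', or underscores ever occur in them);
-- exact on those strings (PySem.Int.ofChars? cannot be unfolded symbolically over the
-- length-t repeated strings, so A's int() is ported by hand, step for step, for this shape).
def pvDigitVal (c : Char) : Int := (c.toNat : Int) - 48

def pvIntOfBuilt (cs : List Char) : Int :=
  match cs with
  | [] => 0
  | c :: ds =>
    if c = '-' then -(ds.foldl (fun a c => 10 * a + pvDigitVal c) 0)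
    else (c :: ds).foldl (fun a c => 10 * a + pvDigitVal c) 0

def check_concatenated_sum (n : Int) (t : Int) : Bool :=
  if t == 0 then false else
    let minus : Bool := PySem.List.pyGet? (PySem.Int.toChars n) 0 == some '-'   -- str(n)[0] == '-'
    let n_s : List Char :=
      if minus then PySem.List.slice (PySem.Int.toChars n) (some 1) none        -- str(n)[1:]
      else PySem.Int.toChars n
    let arr_s : List (List Char) := n_s.foldl (fun acc x =>
      if minus then acc ++ ['-' :: List.replicate t.toNat x]                    -- '-' + x*t
      else acc ++ [List.replicate t.toNat x]) []                                -- x*t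
    let res : Int := (arr_s.map pvIntOfBuilt).sum                               -- sum([int(x) …])
    decide (n = res)

-- ===== PORT B =====
-- the while-d loop of Source B: s += d % 10; d //= 10
def pvDigitSumGo (d : Nat) (s : Int) : Int :=
  if h : d = 0 then s else pvDigitSumGo (d / 10) (s + ((d % 10 : Nat) : Int))
termination_by d
decreasing_by exact Nat.div_lt_self (Nat.pos_of_ne_zero h) (by norm_num)

def check_concatenated_sum_alt (n : Int) (t : Int) : Bool :=
  if t ≤ 0 then false else
    let repunit : Int := PySem.Int.floordiv (10 ^ t.toNat - 1) 9                -- (10**t - 1) // 9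
    let s : Int := pvDigitSumGo n.natAbs 0
    let total : Int := s * repunit
    decide (n = if n < 0 then -total else total)

-- ===== PRECONDITION & SPEC =====
-- Pre_ excludes t < 0: there A raises ValueError (int('') on the empty repeated string).
def Pre_check_concatenated_sum (n : Int) (t : Int) : Prop := 0 ≤ t
instance (n : Int) (t : Int) : Decidable (Pre_check_concatenated_sum n t) := by unfold Pre_check_concatenated_sum; infer_instance
def pvWitness_check_concatenated_sum : Int × Int := (12, 2)

def Spec_check_concatenated_sum (n : Int) (t : Int) (out : Bool) : Prop := out = check_concatenated_sum_alt n t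
instance (n : Int) (t : Int) (out : Bool) : Decidable (Spec_check_concatenated_sum n t out) := by unfold Spec_check_concatenated_sum; infer_instance

-- ===== CLAIM (what is proved, stated in full; the proofs are below) =====
def Claim_equal_check_concatenated_sum : Prop := ∀ (n : Int) (t : Int), Dom_check_concatenated_sum n t → Pre_check_concatenated_sum n t → Spec_check_concatenated_sum n t (check_concatenated_sum n t)

-- ===== LEMMAS AND PROOFS =====

-- repunit with k ones, recursively
def pvRepN : Nat → Int
  | 0 => 0
  | k + 1 => 10 * pvRepN k + 1

theorem pvRepN_succ' (k : Nat) : pvRepN (k + 1) = 10 ^ k + pvRepN k := by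
  induction k with
  | zero => simp [pvRepN]
  | succ m ih =>
    calc pvRepN (m + 2) = 10 * pvRepN (m + 1) + 1 := rfl
    _ = 10 * (10 ^ m + pvRepN m) + 1 := by rw [ih]
    _ = 10 ^ (m + 1) + (10 * pvRepN m + 1) := by ring
    _ = 10 ^ (m + 1) + pvRepN (m + 1) := rfl

theorem pvRepN_nine (k : Nat) : 9 * pvRepN k = 10 ^ k - 1 := by
  induction k with
  | zero => simp [pvRepN]
  | succ m ih =>
    have : pvRepN (m + 1) = 10 * pvRepN m + 1 := rfl
    rw [this]; rw [pow_succ]; omega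

theorem pvRepunit_eq (k : Nat) : PySem.Int.floordiv ((10 : Int) ^ k - 1) 9 = pvRepN k := by
  rw [PySem.Int.floordiv_eq_iff_of_pos (by norm_num)]
  have h := pvRepN_nine k
  omega

-- value of a run of k copies of one digit char under the digit fold
theorem pvFold_replicate (k : Nat) (c : Char) (a : Int) :
    (List.replicate k c).foldl (fun a c => 10 * a + pvDigitVal c) a
      = a * 10 ^ k + pvDigitVal c * pvRepN k := by
  induction k generalizing a with
  | zero => simp [pvRepN]
  | succ m ih =>
    rw [List.replicate_succ, List.foldl_cons, ih]
    rw [pvRepN_succ']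
    ring

-- pvDigitSumGo with accumulator
theorem pvDigitSumGo_acc (m : Nat) (s : Int) : pvDigitSumGo m s = s + pvDigitSumGo m 0 := by
  induction m using Nat.strong_induction_on generalizing s with
  | _ m ih =>
    by_cases h : m = 0
    · subst h; simp [pvDigitSumGo]
    · have hlt : m / 10 < m := Nat.div_lt_self (Nat.pos_of_ne_zero h) (by norm_num)
      have e : ∀ s : Int, pvDigitSumGo m s = pvDigitSumGo (m / 10) (s + ((m % 10 : Nat) : Int)) :=
        fun s => by rw [pvDigitSumGo]; simp [h]
      rw [e s, e 0, ih (m / 10) hlt, ih (m / 10) hlt (0 + _)]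
      ring

theorem pvDigitVal_digitChar (k : Nat) (hk : k < 10) : pvDigitVal (Nat.digitChar k) = k := by
  interval_cases k <;> decide

-- the digit sum of the decimal string of m equals Source B's arithmetic digit sum
theorem pvDigitSum_toDigits (m : Nat) :
    ((Nat.toDigits 10 m).map pvDigitVal).sum = pvDigitSumGo m 0 := by
  induction m using Nat.strong_induction_on with
  | _ m ih =>
    rw [Nat.toDigits_eq_if (by norm_num)]
    by_cases h : m < 10
    · simp only [if_pos h, List.map_cons, List.map_nil, List.sum_cons, List.sum_nil,
        pvDigitVal_digitChar m h, add_zero]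
      by_cases h0 : m = 0
      · subst h0; simp [pvDigitSumGo]
      · rw [pvDigitSumGo]; simp only [h0, dite_false]
        rw [Nat.div_eq_of_lt h, pvDigitSumGo]
        simp [Nat.mod_eq_of_lt h]
    · have hm0 : m ≠ 0 := by omega
      have hlt : m / 10 < m := Nat.div_lt_self (Nat.pos_of_ne_zero hm0) (by norm_num)
      simp only [if_neg h, List.map_append, List.sum_append, List.map_cons, List.map_nil,
        List.sum_cons, List.sum_nil, add_zero]
      rw [ih (m / 10) hlt, pvDigitVal_digitChar _ (Nat.mod_lt m (by norm_num))]
      conv_rhs => rw [pvDigitSumGo]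
      simp only [hm0, dite_false]
      rw [pvDigitSumGo_acc (m / 10) (0 + ((m % 10 : Nat) : Int))]
      push_cast
      ring

theorem pvDigit_ne_dash {c : Char} (h : c.isDigit = true) : c ≠ '-' := by
  intro he; subst he; simp at h

theorem pvMem_toDigits_ne_dash {m : Nat} {c : Char} (h : c ∈ Nat.toDigits 10 m) : c ≠ '-' :=
  pvDigit_ne_dash (Nat.isDigit_of_mem_toDigits (by norm_num) (by norm_num) h)

theorem pvSum_map_neg {α : Type} (l : List α) (g : α → Int) :
    (l.map fun x => -(g x)).sum = -((l.map g).sum) := by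
  induction l with
  | nil => simp
  | cons a l ih => simp [ih]; ring

-- pvIntOfBuilt on the two shapes A builds (head of the digit run is not '-')
theorem pvIntOfBuilt_pos {k : Nat} (hk : k ≠ 0) {c : Char} (hc : c ≠ '-') :
    pvIntOfBuilt (List.replicate k c) = pvDigitVal c * pvRepN k := by
  obtain ⟨j, rfl⟩ : ∃ j, k = j + 1 := ⟨k - 1, by omega⟩
  rw [List.replicate_succ]
  show pvIntOfBuilt (c :: List.replicate j c) = _
  rw [show pvIntOfBuilt (c :: List.replicate j c)
      = (c :: List.replicate j c).foldl (fun a c => 10 * a + pvDigitVal c) 0 by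
    simp [pvIntOfBuilt, hc]]
  rw [← List.replicate_succ, pvFold_replicate]
  simp

theorem pvIntOfBuilt_neg (k : Nat) (c : Char) :
    pvIntOfBuilt ('-' :: List.replicate k c) = -(pvDigitVal c * pvRepN k) := by
  rw [show pvIntOfBuilt ('-' :: List.replicate k c)
      = -((List.replicate k c).foldl (fun a c => 10 * a + pvDigitVal c) 0) by
    simp [pvIntOfBuilt]]
  rw [pvFold_replicate]; simp

-- ===== VERDICT (by name: the statement is the Claim_ definition above) =====
theorem check_concatenated_sum_spec : Claim_equal_check_concatenated_sum := by
  intro n t _ hpre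
  unfold Spec_check_concatenated_sum check_concatenated_sum check_concatenated_sum_alt
  by_cases ht0 : t = 0
  · subst ht0; simp
  · have ht1 : 1 ≤ t := by unfold Pre_check_concatenated_sum at hpre; omega
    have hT : t.toNat ≠ 0 := by omega
    rw [if_neg (by simpa using ht0), if_neg (by omega)]
    simp only [pvRepunit_eq]
    by_cases hn : n < 0
    · -- negative n: str(n) = '-' :: digits of |n|
      have htc : PySem.Int.toChars n = '-' :: Nat.toDigits 10 n.natAbs := by
        simp [PySem.Int.toChars, hn]
      rw [htc]
      have hminus : (PySem.List.pyGet? ('-' :: Nat.toDigits 10 n.natAbs) 0 == some '-') = true := by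
        rw [show (0 : Int) = ((0 : Nat) : Int) from rfl, PySem.List.pyGet?_natCast]; rfl
      rw [hminus]
      simp only [if_true]
      rw [PySem.List.slice_from _ (by norm_num)]
      simp only [Int.toNat_one, List.drop_succ_cons, List.drop_zero]
      simp only [PySem.List.foldl_append_singleton_eq_map (fun x => '-' :: List.replicate t.toNat x),
        List.nil_append, List.map_map]
      have : ((Nat.toDigits 10 n.natAbs).map (pvIntOfBuilt ∘ fun x => '-' :: List.replicate t.toNat x)).sum
          = -(((Nat.toDigits 10 n.natAbs).map pvDigitVal).sum * pvRepN t.toNat) := by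
        simp only [Function.comp_def]
        rw [List.map_congr_left
          (fun c _ => pvIntOfBuilt_neg t.toNat c :
            ∀ c ∈ Nat.toDigits 10 n.natAbs, pvIntOfBuilt ('-' :: List.replicate t.toNat c)
              = -(pvDigitVal c * pvRepN t.toNat))]
        rw [pvSum_map_neg, List.sum_map_mul_right]
      simp only [this, pvDigitSum_toDigits]
      simp [hn]
    · -- nonnegative n: str(n) = digits of n
      have htc : PySem.Int.toChars n = Nat.toDigits 10 n.toNat := by
        simp [PySem.Int.toChars, hn]
      rw [htc]
      have hne : Nat.toDigits 10 n.toNat ≠ [] := by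
        have := @Nat.length_toDigits_pos 10 n.toNat
        intro h; rw [h] at this; simp at this
      have hminus : (PySem.List.pyGet? (Nat.toDigits 10 n.toNat) 0 == some '-') = false := by
        rw [show (0 : Int) = ((0 : Nat) : Int) from rfl, PySem.List.pyGet?_natCast]
        obtain ⟨c, cs, hcs⟩ := List.exists_cons_of_ne_nil hne
        rw [hcs]
        have hcd : c ≠ '-' := pvMem_toDigits_ne_dash (by rw [hcs]; exact List.mem_cons_self)
        simpa using fun h => hcd (by simpa using h)
      rw [hminus]
      simp only [Bool.false_eq_true, if_false]
      simp only [PySem.List.foldl_append_singleton_eq_map (fun x => List.replicate t.toNat x),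
        List.nil_append, List.map_map]
      have : ((Nat.toDigits 10 n.toNat).map (pvIntOfBuilt ∘ fun x => List.replicate t.toNat x)).sum
          = ((Nat.toDigits 10 n.toNat).map pvDigitVal).sum * pvRepN t.toNat := by
        rw [← List.sum_map_mul_right]
        apply congrArg List.sum
        apply List.map_congr_left
        intro c hc
        exact pvIntOfBuilt_pos hT (pvMem_toDigits_ne_dash hc)
      simp only [this, pvDigitSum_toDigits]
      have : n.natAbs = n.toNat := by omega
      rw [this]
      simp [hn]
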